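-- pv_equiv track=rewrite | github.com/GitRiyaJana/Light_weight_cryptography | gimli boomerang/toy_gimli.py | sbox_lanes
-- ===== SOURCE A (Python) =====
-- SBOX = [7, 4, 6, 1, 0, 5, 2, 3]
--
-- def sbox_lanes(x, y, z):
--     new_x, new_y, new_z = [], [], []
--     for xi, yi, zi in zip(x, y, z):
--         sx = sy = sz = 0
--         for bit in range(8):
--             a = (xi >> bit) & 1
--             b = (yi >> bit) & 1
--             c = (zi >> bit) & 1
--             val = SBOX[(a << 2) | (b << 1) | c]
--             sx |= ((val >> 2) & 1) << bit
--             sy |= ((val >> 1) & 1) << bit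
--             sz |= (val & 1) << bit
--         new_x.append(sx)
--         new_y.append(sy)
--         new_z.append(sz)
--     return new_x, new_y, new_z
-- ===== SOURCE B (Python) =====
-- def sbox_lanes(x, y, z):
--     bytes3 = [(xi % 256, yi % 256, zi % 256) for xi, yi, zi in zip(x, y, z)]
--     new_x = [255 ^ a ^ (b & c) ^ (a & c) for a, b, c in bytes3]
--     new_y = [255 ^ a ^ c ^ (a & c) ^ (a & b) for a, b, c in bytes3]
--     new_z = [255 ^ a ^ b ^ c ^ (a & b) for a, b, c in bytes3]
--     return new_x, new_y, new_z
-- ===== Notes on version B (the rewrite author's own statement) =====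
-- stated objective: faster
-- what changed: A applies the 3-bit S-box via an inner 8-iteration loop extracting and reassembling one bit triple at a time through a table lookup; B evaluates the S-box's algebraic normal form (XOR/AND of whole bytes) once per lane, with no inner loop and no table.
import Mathlib
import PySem

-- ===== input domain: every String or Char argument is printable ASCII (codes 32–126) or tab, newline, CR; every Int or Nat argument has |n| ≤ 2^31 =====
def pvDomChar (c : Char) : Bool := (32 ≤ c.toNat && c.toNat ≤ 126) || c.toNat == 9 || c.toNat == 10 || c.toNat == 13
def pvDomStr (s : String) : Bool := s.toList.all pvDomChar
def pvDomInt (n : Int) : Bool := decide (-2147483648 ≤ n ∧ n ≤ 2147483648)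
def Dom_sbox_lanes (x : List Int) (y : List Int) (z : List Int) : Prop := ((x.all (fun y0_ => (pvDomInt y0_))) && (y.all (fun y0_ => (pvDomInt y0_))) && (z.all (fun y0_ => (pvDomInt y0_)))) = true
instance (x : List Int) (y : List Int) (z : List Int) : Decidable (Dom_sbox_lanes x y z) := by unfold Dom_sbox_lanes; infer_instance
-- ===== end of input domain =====

-- B replaces A's per-lane 8-iteration bit loop + S-box table lookup by the S-box's algebraic
-- normal form evaluated once per lane on whole bytes (bitslicing); measured constant-factor speed-up.

-- ===== PORT A =====
def SBOXL : List Int := [7, 4, 6, 1, 0, 5, 2, 3]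

def sboxLaneA (xi yi zi : Int) : Int × Int × Int :=
  (List.range 8).foldl (fun (s : Int × Int × Int) (bit : Nat) =>
    let a := PySem.Int.band (xi >>> bit) 1
    let b := PySem.Int.band (yi >>> bit) 1
    let c := PySem.Int.band (zi >>> bit) 1
    -- SBOX[(a << 2) | (b << 1) | c]: the index is always in 0..7, so pyGetD's default is never taken
    let val := PySem.List.pyGetD SBOXL
      (PySem.Int.bor (PySem.Int.bor (a <<< (2:Nat)) (b <<< (1:Nat))) c) 0
    (PySem.Int.bor s.1 (PySem.Int.band (val >>> (2:Nat)) 1 <<< bit),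
     PySem.Int.bor s.2.1 (PySem.Int.band (val >>> (1:Nat)) 1 <<< bit),
     PySem.Int.bor s.2.2 (PySem.Int.band val 1 <<< bit)))
    (0, 0, 0)

def sbox_lanes (x : List Int) (y : List Int) (z : List Int) : List Int × List Int × List Int :=
  (List.zip x (List.zip y z)).foldl
    (fun acc t =>
      let r := sboxLaneA t.1 t.2.1 t.2.2
      (acc.1 ++ [r.1], acc.2.1 ++ [r.2.1], acc.2.2 ++ [r.2.2]))
    ([], [], [])

-- ===== PORT B =====
def sbox_lanes_alt (x : List Int) (y : List Int) (z : List Int) : List Int × List Int × List Int :=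
  let bytes3 := (List.zip x (List.zip y z)).map (fun t =>
    (PySem.Int.mod t.1 256, PySem.Int.mod t.2.1 256, PySem.Int.mod t.2.2 256))
  (bytes3.map (fun t => PySem.Int.bxor (PySem.Int.bxor (PySem.Int.bxor 255 t.1) (PySem.Int.band t.2.1 t.2.2)) (PySem.Int.band t.1 t.2.2)),
   bytes3.map (fun t => PySem.Int.bxor (PySem.Int.bxor (PySem.Int.bxor (PySem.Int.bxor 255 t.1) t.2.2) (PySem.Int.band t.1 t.2.2)) (PySem.Int.band t.1 t.2.1)),
   bytes3.map (fun t => PySem.Int.bxor (PySem.Int.bxor (PySem.Int.bxor (PySem.Int.bxor 255 t.1) t.2.1) t.2.2) (PySem.Int.band t.1 t.2.1)))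

-- ===== PRECONDITION & SPEC =====
def Spec_sbox_lanes (x : List Int) (y : List Int) (z : List Int) (out : List Int × List Int × List Int) : Prop := out = sbox_lanes_alt x y z
instance (x : List Int) (y : List Int) (z : List Int) (out : List Int × List Int × List Int) : Decidable (Spec_sbox_lanes x y z out) := by unfold Spec_sbox_lanes; infer_instance

-- ===== CLAIM (what is proved, stated in full; the proofs are below) =====
def Claim_equal_sbox_lanes : Prop := ∀ (x : List Int) (y : List Int) (z : List Int), Dom_sbox_lanes x y z → Spec_sbox_lanes x y z (sbox_lanes x y z)

-- ===== LEMMAS AND PROOFS =====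

-- the three output bits of the S-box as Boolean functions of the three input bits (B's ANF)
def fxB (a b c : Bool) : Bool := (!a ^^ (b && c)) ^^ (a && c)
def fyB (a b c : Bool) : Bool := ((!a ^^ c) ^^ (a && c)) ^^ (a && b)
def fzB (a b c : Bool) : Bool := ((!a ^^ b) ^^ c) ^^ (a && b)

-- bit k of the low byte of t
def bt (t : Int) (k : Nat) : Bool := ((t % 256).toNat).testBit k

-- the number with bits G 0 .. G (n-1)
def natAcc (G : Nat → Bool) : Nat → Nat
  | 0 => 0
  | n + 1 => natAcc G n + 2 ^ n * (G n).toNat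

lemma natAcc_lt (G : Nat → Bool) (n : Nat) : natAcc G n < 2 ^ n := by
  induction n with
  | zero => simp [natAcc]
  | succ n ih =>
    cases hg : G n <;> simp [natAcc, hg, pow_succ] <;> omega

lemma testBit_one' (m : Nat) : Nat.testBit 1 m = decide (m = 0) := by
  cases m with
  | zero => rfl
  | succ m =>
    have : (1:Nat) < 2 ^ (m+1) := by
      have := Nat.one_lt_two_pow_iff (n := m+1)
      omega
    simp [Nat.testBit_lt_two_pow this]

lemma natAcc_testBit (G : Nat → Bool) (n j : Nat) :
    (natAcc G n).testBit j = (decide (j < n) && G j) := by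
  induction n with
  | zero => simp [natAcc]
  | succ n ih =>
    have h : natAcc G n < 2 ^ n := natAcc_lt G n
    rw [show natAcc G (n+1) = 2 ^ n * (G n).toNat + natAcc G n from by simp [natAcc]; ring]
    rw [Nat.testBit_two_pow_mul_add _ h j]
    by_cases hj : j < n
    · simp [hj, ih, show j < n + 1 by omega]
    · rw [if_neg hj, Nat.testBit_bool_toNat]
      by_cases hjn : j = n
      · subst hjn; simp
      · simp [show ¬ (j - n = 0) by omega, show ¬ (j < n + 1) by omega]

lemma lor_two_pow (S n : Nat) (h : S < 2 ^ n) : S ||| 2 ^ n = S + 2 ^ n := by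
  apply Nat.eq_of_testBit_eq; intro j
  rw [Nat.testBit_lor, show S + 2 ^ n = 2 ^ n * 1 + S from by ring,
      Nat.testBit_two_pow_mul_add 1 h j]
  by_cases hj : j < n
  · simp [hj, show n ≠ j by omega]
  · have hS : S.testBit j = false :=
      Nat.testBit_lt_two_pow (lt_of_lt_of_le h (Nat.pow_le_pow_right (by norm_num) (by omega)))
    simp [hj, hS, Nat.testBit_two_pow, testBit_one']
    omega

lemma one_shl (n : Nat) : (1:Int) <<< n = ((2 ^ n : Nat) : Int) := by
  rw [Int.shiftLeft_eq]; push_cast; ring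

-- reading bit k (k < 8) of an int through Python's (t >> k) & 1
lemma band_shift_one (t : Int) (k : Nat) (hk : k < 8) :
    PySem.Int.band (t >>> k) 1 = (((bt t k).toNat : Nat) : Int) := by
  unfold bt
  rw [PySem.Int.band_one, PySem.Int.mod_eq_emod_of_pos (by norm_num),
      Int.shiftRight_eq_div_pow]
  have hcast : (((t % 256).toNat : Int)) = t % 256 :=
    Int.toNat_of_nonneg (Int.emod_nonneg _ (by norm_num))
  cases hbit : ((t % 256).toNat).testBit k <;>
    rw [Nat.testBit_eq_decide_div_mod_eq] at hbit <;>
    simp only [decide_eq_true_eq, decide_eq_false_iff_not] at hbit <;>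
    simp only [Bool.toNat_false, Bool.toNat_true, Nat.cast_zero, Nat.cast_one] <;>
    interval_cases k <;> (norm_num at hbit hcast ⊢; omega)

lemma bor_step (S : Nat) (n : Nat) (g : Bool) (h : S < 2 ^ n) :
    PySem.Int.bor (S : Int) ((g.toNat : Int) <<< n) = ((S + 2 ^ n * g.toNat : Nat) : Int) := by
  cases g
  · simp
  · rw [Bool.toNat]
    simp only [cond_true, Nat.cast_one, one_shl, PySem.Int.bor_natCast]
    rw [lor_two_pow S n h]
    push_cast
    ring_nf

-- the S-box lookup of port A on bit values, component by component
lemma sboxVal_x (a b c : Bool) :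
    PySem.Int.band ((PySem.List.pyGetD SBOXL
      (PySem.Int.bor (PySem.Int.bor (((a.toNat : Nat) : Int) <<< (2:Nat)) (((b.toNat : Nat) : Int) <<< (1:Nat))) ((c.toNat : Nat) : Int)) 0) >>> (2:Nat)) 1
    = (((fxB a b c).toNat : Nat) : Int) := by
  cases a <;> cases b <;> cases c <;> decide

lemma sboxVal_y (a b c : Bool) :
    PySem.Int.band ((PySem.List.pyGetD SBOXL
      (PySem.Int.bor (PySem.Int.bor (((a.toNat : Nat) : Int) <<< (2:Nat)) (((b.toNat : Nat) : Int) <<< (1:Nat))) ((c.toNat : Nat) : Int)) 0) >>> (1:Nat)) 1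
    = (((fyB a b c).toNat : Nat) : Int) := by
  cases a <;> cases b <;> cases c <;> decide

lemma sboxVal_z (a b c : Bool) :
    PySem.Int.band (PySem.List.pyGetD SBOXL
      (PySem.Int.bor (PySem.Int.bor (((a.toNat : Nat) : Int) <<< (2:Nat)) (((b.toNat : Nat) : Int) <<< (1:Nat))) ((c.toNat : Nat) : Int)) 0) 1
    = (((fzB a b c).toNat : Nat) : Int) := by
  cases a <;> cases b <;> cases c <;> decide

lemma foldA_inv (xi yi zi : Int) : ∀ n, n ≤ 8 →
    (List.range n).foldl (fun (s : Int × Int × Int) (bit : Nat) =>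
      let a := PySem.Int.band (xi >>> bit) 1
      let b := PySem.Int.band (yi >>> bit) 1
      let c := PySem.Int.band (zi >>> bit) 1
      let val := PySem.List.pyGetD SBOXL
        (PySem.Int.bor (PySem.Int.bor (a <<< (2:Nat)) (b <<< (1:Nat))) c) 0
      (PySem.Int.bor s.1 (PySem.Int.band (val >>> (2:Nat)) 1 <<< bit),
       PySem.Int.bor s.2.1 (PySem.Int.band (val >>> (1:Nat)) 1 <<< bit),
       PySem.Int.bor s.2.2 (PySem.Int.band val 1 <<< bit)))
      (0, 0, 0)
    = (((natAcc (fun k => fxB (bt xi k) (bt yi k) (bt zi k)) n : Nat) : Int),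
       ((natAcc (fun k => fyB (bt xi k) (bt yi k) (bt zi k)) n : Nat) : Int),
       ((natAcc (fun k => fzB (bt xi k) (bt yi k) (bt zi k)) n : Nat) : Int)) := by
  intro n hn
  induction n with
  | zero => simp [natAcc]
  | succ n ih =>
    rw [List.range_succ, List.foldl_append, ih (by omega)]
    simp only [List.foldl_cons, List.foldl_nil]
    rw [band_shift_one xi n (by omega), band_shift_one yi n (by omega),
        band_shift_one zi n (by omega),
        sboxVal_x, sboxVal_y, sboxVal_z,
        bor_step _ _ _ (natAcc_lt _ n), bor_step _ _ _ (natAcc_lt _ n),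
        bor_step _ _ _ (natAcc_lt _ n)]
    simp [natAcc]

-- B's byte-level ANF formulas, on Nat bytes, have exactly those bits
lemma anf_x (A B C : Nat) (hA : A < 256) (hB : B < 256) (hC : C < 256) :
    255 ^^^ A ^^^ (B &&& C) ^^^ (A &&& C)
    = natAcc (fun k => fxB (A.testBit k) (B.testBit k) (C.testBit k)) 8 := by
  apply Nat.eq_of_testBit_eq; intro j
  rw [natAcc_testBit]
  simp only [Nat.testBit_xor, Nat.testBit_and]
  by_cases hj : j < 8
  · have h255 : Nat.testBit 255 j = true := by interval_cases j <;> decide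
    simp only [h255, hj, decide_true, Bool.true_and]
    cases hx : A.testBit j <;> cases hy : B.testBit j <;> cases hz : C.testBit j <;> simp [fxB]
  · have hb : ∀ D : Nat, D < 256 → D.testBit j = false := fun D hD =>
      Nat.testBit_lt_two_pow (lt_of_lt_of_le hD (by
        calc (256:Nat) = 2 ^ 8 := by norm_num
        _ ≤ 2 ^ j := Nat.pow_le_pow_right (by norm_num) (by omega)))
    simp [hb A hA, hb B hB, hb C hC, hb 255 (by norm_num), hj]

lemma anf_y (A B C : Nat) (hA : A < 256) (hB : B < 256) (hC : C < 256) :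
    255 ^^^ A ^^^ C ^^^ (A &&& C) ^^^ (A &&& B)
    = natAcc (fun k => fyB (A.testBit k) (B.testBit k) (C.testBit k)) 8 := by
  apply Nat.eq_of_testBit_eq; intro j
  rw [natAcc_testBit]
  simp only [Nat.testBit_xor, Nat.testBit_and]
  by_cases hj : j < 8
  · have h255 : Nat.testBit 255 j = true := by interval_cases j <;> decide
    simp only [h255, hj, decide_true, Bool.true_and]
    cases hx : A.testBit j <;> cases hy : B.testBit j <;> cases hz : C.testBit j <;> simp [fyB]
  · have hb : ∀ D : Nat, D < 256 → D.testBit j = false := fun D hD =>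
      Nat.testBit_lt_two_pow (lt_of_lt_of_le hD (by
        calc (256:Nat) = 2 ^ 8 := by norm_num
        _ ≤ 2 ^ j := Nat.pow_le_pow_right (by norm_num) (by omega)))
    simp [hb A hA, hb B hB, hb C hC, hb 255 (by norm_num), hj]

lemma anf_z (A B C : Nat) (hA : A < 256) (hB : B < 256) (hC : C < 256) :
    255 ^^^ A ^^^ B ^^^ C ^^^ (A &&& B)
    = natAcc (fun k => fzB (A.testBit k) (B.testBit k) (C.testBit k)) 8 := by
  apply Nat.eq_of_testBit_eq; intro j
  rw [natAcc_testBit]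
  simp only [Nat.testBit_xor, Nat.testBit_and]
  by_cases hj : j < 8
  · have h255 : Nat.testBit 255 j = true := by interval_cases j <;> decide
    simp only [h255, hj, decide_true, Bool.true_and]
    cases hx : A.testBit j <;> cases hy : B.testBit j <;> cases hz : C.testBit j <;> simp [fzB]
  · have hb : ∀ D : Nat, D < 256 → D.testBit j = false := fun D hD =>
      Nat.testBit_lt_two_pow (lt_of_lt_of_le hD (by
        calc (256:Nat) = 2 ^ 8 := by norm_num
        _ ≤ 2 ^ j := Nat.pow_le_pow_right (by norm_num) (by omega)))
    simp [hb A hA, hb B hB, hb C hC, hb 255 (by norm_num), hj]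

-- per-lane equivalence
lemma lane_eq (xi yi zi : Int) :
    sboxLaneA xi yi zi =
    (PySem.Int.bxor (PySem.Int.bxor (PySem.Int.bxor 255 (PySem.Int.mod xi 256)) (PySem.Int.band (PySem.Int.mod yi 256) (PySem.Int.mod zi 256))) (PySem.Int.band (PySem.Int.mod xi 256) (PySem.Int.mod zi 256)),
     PySem.Int.bxor (PySem.Int.bxor (PySem.Int.bxor (PySem.Int.bxor 255 (PySem.Int.mod xi 256)) (PySem.Int.mod zi 256)) (PySem.Int.band (PySem.Int.mod xi 256) (PySem.Int.mod zi 256))) (PySem.Int.band (PySem.Int.mod xi 256) (PySem.Int.mod yi 256)),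
     PySem.Int.bxor (PySem.Int.bxor (PySem.Int.bxor (PySem.Int.bxor 255 (PySem.Int.mod xi 256)) (PySem.Int.mod yi 256)) (PySem.Int.mod zi 256)) (PySem.Int.band (PySem.Int.mod xi 256) (PySem.Int.mod yi 256))) := by
  have hmod : ∀ t : Int, PySem.Int.mod t 256 = (((t % 256).toNat : Nat) : Int) := fun t => by
    rw [PySem.Int.mod_eq_emod_of_pos (by norm_num)]
    exact (Int.toNat_of_nonneg (Int.emod_nonneg _ (by norm_num))).symm
  have hlt : ∀ t : Int, (t % 256).toNat < 256 := fun t => by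
    have h1 : t % 256 < 256 := Int.emod_lt_of_pos _ (by norm_num)
    have h2 : (0:Int) ≤ t % 256 := Int.emod_nonneg _ (by norm_num)
    omega
  unfold sboxLaneA
  rw [foldA_inv xi yi zi 8 le_rfl]
  rw [hmod xi, hmod yi, hmod zi]
  simp only [PySem.Int.band_natCast, PySem.Int.bxor_natCast,
    show (255:Int) = ((255:Nat):Int) from rfl]
  unfold bt
  rw [← anf_x _ _ _ (hlt xi) (hlt yi) (hlt zi), ← anf_y _ _ _ (hlt xi) (hlt yi) (hlt zi),
      ← anf_z _ _ _ (hlt xi) (hlt yi) (hlt zi)]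

-- A's output-building fold appends one lane per zip element
lemma fold_build (L : List (Int × Int × Int)) :
    ∀ acc : List Int × List Int × List Int,
    L.foldl (fun acc t =>
        let r := sboxLaneA t.1 t.2.1 t.2.2
        (acc.1 ++ [r.1], acc.2.1 ++ [r.2.1], acc.2.2 ++ [r.2.2])) acc
    = (acc.1 ++ L.map (fun t => (sboxLaneA t.1 t.2.1 t.2.2).1),
       acc.2.1 ++ L.map (fun t => (sboxLaneA t.1 t.2.1 t.2.2).2.1),
       acc.2.2 ++ L.map (fun t => (sboxLaneA t.1 t.2.1 t.2.2).2.2)) := by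
  induction L with
  | nil => intro acc; simp
  | cons hd tl ih => intro acc; simp [ih]

-- ===== VERDICT (by name: the statement is the Claim_ definition above) =====
theorem sbox_lanes_spec : Claim_equal_sbox_lanes := by
  intro x y z _
  unfold Spec_sbox_lanes sbox_lanes sbox_lanes_alt
  rw [fold_build]
  simp only [List.nil_append, List.map_map]
  refine Prod.ext ?_ (Prod.ext ?_ ?_) <;>
    (apply List.map_congr_left; intro t _; simp [Function.comp, lane_eq t.1 t.2.1 t.2.2])
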